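-- pv_equiv track=rewrite | github.com/edmundlth/bioinformatics_qc | file_check.py | get_fastq_file_pair
-- ===== SOURCE A (Python) =====
-- def get_fastq_file_pair(filenames):
--     pairs = []
--     num_file = len(filenames)
--     for i in range(num_file - 1):
--         for j in range(i + 1, num_file):
--             name1 = filenames[i]
--             name2 = filenames[j]
--             if _is_fastq_pair(name1, name2):
--                 pairs.append((name1, name2))
--     return pairs
--
-- def _is_fastq_pair(name1, name2):
--     if len(name1) != len(name2):
--         return False
--     name1 = name1.replace('R1', '')
--     name1 = name1.replace('R2', '')
--     name2 = name2.replace('R1', '')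
--     name2 = name2.replace('R2', '')
--     return name1 == name2
-- ===== SOURCE B (Python) =====
-- def get_fastq_file_pair(filenames):
--     # Hash-group names by (length, name with 'R1'/'R2' removed), then pair
--     # each name only with later members of its own group.
--     groups = {}
--     for i, name in enumerate(filenames):
--         key = (len(name), name.replace('R1', '').replace('R2', ''))
--         groups.setdefault(key, []).append((i, name))
--     pairs = []
--     for i, name in enumerate(filenames):
--         key = (len(name), name.replace('R1', '').replace('R2', ''))
--         for j, other in groups[key]:
--             if j > i:
--                 pairs.append((name, other))
--     return pairs
-- ===== Notes on version B (the rewrite author's own statement) =====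
-- stated objective: faster
-- what changed: Replaces the all-pairs nested scan (which re-normalizes both strings for every pair) with a single hash-grouping pass keyed by (length, name without R1/R2), then emits pairs only within each group in index order.
import Mathlib
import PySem

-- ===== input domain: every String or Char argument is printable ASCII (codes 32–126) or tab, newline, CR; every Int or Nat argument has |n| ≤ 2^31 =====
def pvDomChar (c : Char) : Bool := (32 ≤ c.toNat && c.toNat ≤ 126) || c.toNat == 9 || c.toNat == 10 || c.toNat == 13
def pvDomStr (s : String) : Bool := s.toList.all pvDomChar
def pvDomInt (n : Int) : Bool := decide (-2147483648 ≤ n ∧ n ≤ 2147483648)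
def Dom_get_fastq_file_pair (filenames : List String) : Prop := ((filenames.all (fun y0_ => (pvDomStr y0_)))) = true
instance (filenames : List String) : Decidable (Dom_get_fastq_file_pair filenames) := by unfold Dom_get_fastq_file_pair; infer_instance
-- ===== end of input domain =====

-- B replaces A's all-pairs nested scan with one hash-grouping pass keyed by
-- (length, name with 'R1'/'R2' removed), pairing each name with later members
-- of its own group, so normalization happens once per name instead of per pair.


-- ===== PORT A =====
-- _is_fastq_pair, transliterated
def isFastqPair (name1 name2 : String) : Bool :=
  if PySem.Str.len name1 != PySem.Str.len name2 then false
  else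
    let n1 := PySem.Str.replace (PySem.Str.replace name1 "R1" "") "R2" ""
    let n2 := PySem.Str.replace (PySem.Str.replace name2 "R1" "") "R2" ""
    n1 == n2

def get_fastq_file_pair (filenames : List String) : List (String × String) :=
  let num_file : Int := PySem.List.len filenames
  (PySem.List.pyRange 0 (num_file - 1) 1).foldl (fun pairs i =>
    (PySem.List.pyRange (i + 1) num_file 1).foldl (fun pairs j =>
      let name1 := PySem.List.pyGetD filenames i ""
      let name2 := PySem.List.pyGetD filenames j ""
      if isFastqPair name1 name2 then pairs ++ [(name1, name2)] else pairs) pairs) []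

-- ===== PORT B =====
-- key = (len(name), name.replace('R1','').replace('R2',''))
def altKey (name : String) : Int × String :=
  (PySem.Str.len name, PySem.Str.replace (PySem.Str.replace name "R1" "") "R2" "")

def get_fastq_file_pair_alt (filenames : List String) : List (String × String) :=
  let groups :=
    (PySem.List.enumerate filenames 0).foldl
      (fun d p => d.modify (altKey p.2) [] (· ++ [p])) PySem.Dict.empty
  (PySem.List.enumerate filenames 0).foldl (fun pairs p =>
    (groups.getD (altKey p.2) []).foldl (fun pairs q =>
      if q.1 > p.1 then pairs ++ [(p.2, q.2)] else pairs) pairs) []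

-- ===== PRECONDITION & SPEC =====
def Spec_get_fastq_file_pair (filenames : List String) (out : List (String × String)) : Prop := out = get_fastq_file_pair_alt filenames
instance (filenames : List String) (out : List (String × String)) : Decidable (Spec_get_fastq_file_pair filenames out) := by unfold Spec_get_fastq_file_pair; infer_instance

-- ===== CLAIM (what is proved, stated in full; the proofs are below) =====
def Claim_equal_get_fastq_file_pair : Prop := ∀ (filenames : List String), Dom_get_fastq_file_pair filenames → Spec_get_fastq_file_pair filenames (get_fastq_file_pair filenames)

-- ===== LEMMAS AND PROOFS =====

-- abbreviation used only by the proofs: the name at index i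
def gIdx (fns : List String) (i : Int) : String := PySem.List.pyGetD fns i ""

-- a foldl that appends a per-element block is a flatMap
theorem foldl_flat {A B : Type} (l : List A) (g : A → List B) (F : List B → A → List B)
    (h : ∀ (acc : List B) (x : A), x ∈ l → F acc x = acc ++ g x) :
    l.foldl F [] = l.flatMap g := by
  rw [PySem.List.foldl_congr_mem l F (fun acc x => acc ++ g x) [] h,
    PySem.List.foldl_append_eq_flatMap, List.nil_append]

-- A's pair test is equality of B's grouping keys
theorem isFastqPair_eq_key (n1 n2 : String) :
    isFastqPair n1 n2 = (altKey n2 == altKey n1) := by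
  simp only [isFastqPair, altKey, PySem.Str.len_eq, bne_iff_ne, ne_eq, ite_not]
  by_cases h : (n1.length : Int) = (n2.length : Int)
  · simp [h, BEq.beq, eq_comm]
  · have hn : ¬ n2.length = n1.length := fun hh => h (by exact_mod_cast hh.symm)
    have hn2 : ¬ n1.length = n2.length := fun hh => h (by exact_mod_cast hh)
    simp [BEq.beq, hn, hn2]

-- the grouping dict: lookup at k returns exactly the enumerated entries with key k
theorem groups_getD (filenames : List String) (k : Int × String) :
    (((PySem.List.enumerate filenames 0).foldl
        (fun d p => d.modify (altKey p.2) [] (· ++ [p])) PySem.Dict.empty).getD k []) =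
      (PySem.List.enumerate filenames 0).filter (fun p => altKey p.2 == k) := by
  have h := PySem.Dict.getD_foldl_modify_append
    (l := (PySem.List.enumerate filenames 0).map (fun p => (altKey p.2, p)))
    (d := PySem.Dict.empty) (c := k)
  rw [List.foldl_map] at h
  simpa [Function.comp_def, List.filter_map] using h

-- A as a flatMap over the index range
theorem A_eq_flatMap (fns : List String) :
    get_fastq_file_pair fns =
      (PySem.List.pyRange 0 (PySem.List.len fns) 1).flatMap (fun i =>
        ((PySem.List.pyRange (i + 1) (PySem.List.len fns) 1).filter
            (fun j => isFastqPair (gIdx fns i) (gIdx fns j))).map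
          (fun j => (gIdx fns i, gIdx fns j))) := by
  have h0 : get_fastq_file_pair fns =
      (PySem.List.pyRange 0 (PySem.List.len fns - 1) 1).foldl (fun pairs i =>
        (PySem.List.pyRange (i + 1) (PySem.List.len fns) 1).foldl (fun pairs j =>
          if isFastqPair (gIdx fns i) (gIdx fns j) then
            pairs ++ [(gIdx fns i, gIdx fns j)] else pairs) pairs) [] := rfl
  rw [h0]
  rw [foldl_flat _ (fun i =>
        ((PySem.List.pyRange (i + 1) (PySem.List.len fns) 1).filter
            (fun j => isFastqPair (gIdx fns i) (gIdx fns j))).map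
          (fun j => (gIdx fns i, gIdx fns j))) _
      (by intro pairs i _; exact PySem.List.foldl_append_if _ _ _ _)]
  rcases lt_or_ge 0 (PySem.List.len fns) with hpos | hle
  · have hsplit : PySem.List.pyRange 0 (PySem.List.len fns) 1 =
        PySem.List.pyRange 0 (PySem.List.len fns - 1) 1 ++ [PySem.List.len fns - 1] := by
      have := PySem.List.pyRange_one_succ_right (a := 0) (b := PySem.List.len fns - 1)
        (by simp [PySem.List.len_eq] at hpos ⊢; omega)
      rw [show PySem.List.len fns - 1 + 1 = PySem.List.len fns by ring] at this
      exact this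
    rw [hsplit, List.flatMap_append]
    simp
  · have h1 : PySem.List.pyRange 0 (PySem.List.len fns) 1 = [] :=
      PySem.List.pyRange_one_eq_nil hle
    have h2 : PySem.List.pyRange 0 (PySem.List.len fns - 1) 1 = [] :=
      PySem.List.pyRange_one_eq_nil (by omega)
    rw [h1, h2]

-- B as a flatMap over the same index range
theorem B_eq_flatMap (fns : List String) :
    get_fastq_file_pair_alt fns =
      (PySem.List.pyRange 0 (PySem.List.len fns) 1).flatMap (fun i =>
        ((PySem.List.pyRange 0 (PySem.List.len fns) 1).filter
            (fun j => decide (i < j) && (altKey (gIdx fns j) == altKey (gIdx fns i)))).map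
          (fun j => (gIdx fns i, gIdx fns j))) := by
  have h0 : get_fastq_file_pair_alt fns =
      (PySem.List.enumerate fns 0).foldl (fun pairs p =>
        ((((PySem.List.enumerate fns 0).foldl
            (fun d p => d.modify (altKey p.2) [] (· ++ [p])) PySem.Dict.empty)).getD (altKey p.2) []).foldl
          (fun pairs q => if q.1 > p.1 then pairs ++ [(p.2, q.2)] else pairs) pairs) [] := rfl
  rw [h0]
  rw [foldl_flat _ (fun p =>
        ((((PySem.List.enumerate fns 0).filter (fun q => altKey q.2 == altKey p.2)).filter
            (fun q => decide (p.1 < q.1))).map (fun q => (p.2, q.2)))) _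
      (by
        intro pairs p _
        rw [groups_getD]
        have := PySem.List.foldl_append_if
          (l := (PySem.List.enumerate fns 0).filter (fun q => altKey q.2 == altKey p.2))
          (acc := pairs) (p := fun q => decide (p.1 < q.1)) (f := fun q => (p.2, q.2))
        simpa [gt_iff_lt] using this)]
  rw [PySem.List.enumerate_eq_map_pyRange (d := "")]
  rw [List.flatMap_map]
  simp only [List.filter_filter, List.filter_map, List.map_map, Function.comp_def, gIdx]

-- the two per-index lists coincide inside the range
theorem filter_range_split (n i : Int) (h0 : 0 ≤ i) (hn : i < n) (P : Int → Bool) :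
    (PySem.List.pyRange 0 n 1).filter (fun j => decide (i < j) && P j) =
      (PySem.List.pyRange (i + 1) n 1).filter P := by
  rw [PySem.List.pyRange_one_append 0 (i + 1) n (by omega) (by omega), List.filter_append]
  have h1 : (PySem.List.pyRange 0 (i + 1) 1).filter (fun j => decide (i < j) && P j) = [] := by
    rw [List.filter_eq_nil_iff]
    intro j hj
    have hm := (PySem.List.mem_pyRange_one).mp hj
    simp [show ¬ i < j by omega]
  have h2 : (PySem.List.pyRange (i + 1) n 1).filter (fun j => decide (i < j) && P j) =
      (PySem.List.pyRange (i + 1) n 1).filter P := by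
    apply List.filter_congr
    intro j hj
    have hm := (PySem.List.mem_pyRange_one).mp hj
    simp [show i < j by omega]
  rw [h1, h2, List.nil_append]

theorem get_fastq_file_pair_spec : Claim_equal_get_fastq_file_pair := by
  intro fns _
  unfold Spec_get_fastq_file_pair
  rw [A_eq_flatMap, B_eq_flatMap]
  rw [List.flatMap_def, List.flatMap_def]
  apply congrArg List.flatten
  apply List.map_congr_left
  intro i hi
  have hm := (PySem.List.mem_pyRange_one).mp hi
  rw [filter_range_split (PySem.List.len fns) i (by omega) (by omega)]
  apply congrArg
  apply List.filter_congr
  intro j _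
  rw [isFastqPair_eq_key]
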